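-- pv_equiv track=rewrite | github.com/pablohonney/discord-sessions | metagrams/orthographic_neighborhood.py | build_orthographic_neighborhood_graph
-- ===== SOURCE A (Python) =====
-- import typing as t
--
-- VOCAB = t.List[str]
--
-- ORTHOGRAPHIC_NEIGHBORHOOD = t.List[str]
--
-- ORTHOGRAPHIC_NEIGHBORHOOD_GRAPH = t.Dict[str, ORTHOGRAPHIC_NEIGHBORHOOD]
--
-- def check_metagram(word1: str, word2: str) -> bool:
--     if len(word1) != len(word2):
--         raise ValueError("metagrams must have the same length")
--
--     # count bool true for 1, when true is not equal pair of letters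
--     replace_distance = sum(l1 != l2 for l1, l2 in zip(word1, word2))
--     return replace_distance == 1
--
-- def find_orthographic_neighborhood(
--         word: str, vocab: t.List[str]
-- ) -> ORTHOGRAPHIC_NEIGHBORHOOD:
--     return list(filter(lambda candidate: check_metagram(word, candidate), vocab))
--
-- def build_orthographic_neighborhood_graph(
--         vocab: VOCAB, word_length: int
-- ) -> ORTHOGRAPHIC_NEIGHBORHOOD_GRAPH:
--     vocab = list(
--         filter(lambda w: len(w) == word_length, vocab)
--     )  # TODO can be optimized?
--
--     orthographic_neighborhood_graph = {
--         w: find_orthographic_neighborhood(w, vocab) for w in vocab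
--     }
--     return orthographic_neighborhood_graph
-- ===== SOURCE B (Python) =====
-- def build_orthographic_neighborhood_graph(vocab, word_length):
--     words = [w for w in vocab if len(w) == word_length]
--     n = len(words)
--     buckets = {}
--     for j in range(n):
--         w = words[j]
--         for i in range(word_length):
--             buckets.setdefault((i, w[:i], w[i + 1:]), []).append(j)
--     graph = {}
--     for j in range(n):
--         w = words[j]
--         nbr_idx = []
--         for i in range(word_length):
--             for k in buckets[(i, w[:i], w[i + 1:])]:
--                 if words[k][i] != w[i]:
--                     nbr_idx.append(k)
--         nbr_idx.sort()
--         graph[w] = [words[k] for k in nbr_idx]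
--     return graph
-- ===== Notes on version B (the rewrite author's own statement) =====
-- stated objective: alternative
-- what changed: Replaces A's all-pairs comparison (for every word, scan the whole filtered vocabulary and compare letter by letter) with wildcard-mask bucketing: words are grouped once by (position, word-with-that-position-removed) keys, so each word's neighbors are read off its own buckets (words sharing a mask and differing at the masked letter) and sorted back into vocabulary order.
import Mathlib
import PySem

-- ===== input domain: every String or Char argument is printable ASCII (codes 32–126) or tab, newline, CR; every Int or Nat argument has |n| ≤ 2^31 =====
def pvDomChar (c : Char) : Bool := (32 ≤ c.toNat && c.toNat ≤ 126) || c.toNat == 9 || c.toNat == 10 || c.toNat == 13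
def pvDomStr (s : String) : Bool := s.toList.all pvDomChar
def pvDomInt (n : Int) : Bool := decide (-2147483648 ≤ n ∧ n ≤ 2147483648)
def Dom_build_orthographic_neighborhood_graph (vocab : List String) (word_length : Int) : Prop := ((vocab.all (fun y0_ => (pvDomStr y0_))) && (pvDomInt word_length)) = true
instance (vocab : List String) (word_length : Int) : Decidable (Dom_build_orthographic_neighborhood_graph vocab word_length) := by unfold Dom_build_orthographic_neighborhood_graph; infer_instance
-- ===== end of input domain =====

-- B replaces A's all-pairs scans by wildcard-mask bucketing (group words by one-position-masked
-- patterns; neighbors share a bucket and differ at the masked position); same return value.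

-- ===== PORT A =====
-- check_metagram's 'raise ValueError' is modelled as 'none'; inside
-- build_orthographic_neighborhood_graph both arguments come from the same length-filtered
-- list, so that branch is unreachable there.
def check_metagram (word1 word2 : String) : Option Bool :=
  if PySem.Str.len word1 ≠ PySem.Str.len word2 then none
  else some ((((word1.toList.zip word2.toList).map
      (fun p => if p.1 ≠ p.2 then (1 : Int) else 0)).sum) == 1)

def find_orthographic_neighborhood (word : String) (vocab : List String) : List String :=
  vocab.filter (fun candidate => check_metagram word candidate == some true)

def build_orthographic_neighborhood_graph (vocab : List String) (word_length : Int) : List (String × List String) :=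
  let vocab2 := vocab.filter (fun w => PySem.Str.len w == word_length)
  (vocab2.foldl (fun (d : PySem.Dict String (List String)) w =>
      d.insert w (find_orthographic_neighborhood w vocab2)) PySem.Dict.empty).items

-- ===== PORT B =====
-- pvMaskKey w i is Source B's bucket key (i, w[:i], w[i+1:]).
def pvMaskKey (w : String) (i : Int) : Int × String × String :=
  (i, PySem.Str.slice w none (some i), PySem.Str.slice w (some (i + 1)) none)

-- the unreachable '.getD ""' defaults stand for Python's words[j] on indices that are
-- always in range here (j, k come from range(len(words)))
def build_orthographic_neighborhood_graph_alt (vocab : List String) (word_length : Int) : List (String × List String) :=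
  let words := vocab.filter (fun w => PySem.Str.len w == word_length)
  let n : Int := (words.length : Int)
  let buckets : PySem.Dict (Int × String × String) (List Int) :=
    (PySem.List.pyRange 0 n).foldl (fun b j =>
      let w := (PySem.List.pyGet? words j).getD ""
      (PySem.List.pyRange 0 word_length).foldl (fun b i =>
        b.modify (pvMaskKey w i) [] (· ++ [j])) b) PySem.Dict.empty
  let graph : PySem.Dict String (List String) :=
    (PySem.List.pyRange 0 n).foldl (fun g j =>
      let w := (PySem.List.pyGet? words j).getD ""
      let nbr : List Int :=
        (PySem.List.pyRange 0 word_length).foldl (fun acc i =>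
          (buckets.getD (pvMaskKey w i) []).foldl (fun acc k =>
            if PySem.Str.pyGet? ((PySem.List.pyGet? words k).getD "") i ≠ PySem.Str.pyGet? w i
            then acc ++ [k] else acc) acc) []
      g.insert w ((PySem.List.sorted nbr (fun x => x)).map
        (fun k => (PySem.List.pyGet? words k).getD ""))) PySem.Dict.empty
  graph.items

-- ===== PRECONDITION & SPEC =====
def Spec_build_orthographic_neighborhood_graph (vocab : List String) (word_length : Int) (out : List (String × List String)) : Prop := out = build_orthographic_neighborhood_graph_alt vocab word_length
instance (vocab : List String) (word_length : Int) (out : List (String × List String)) : Decidable (Spec_build_orthographic_neighborhood_graph vocab word_length out) := by unfold Spec_build_orthographic_neighborhood_graph; infer_instance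

-- ===== CLAIM (what is proved, stated in full; the proofs are below) =====
def Claim_equal_build_orthographic_neighborhood_graph : Prop := ∀ (vocab : List String) (word_length : Int), Dom_build_orthographic_neighborhood_graph vocab word_length → Spec_build_orthographic_neighborhood_graph vocab word_length (build_orthographic_neighborhood_graph vocab word_length)

-- ===== LEMMAS AND PROOFS =====

-- proof-side names for the two intermediate values of port B
def pvWAt (ws : List String) (k : Int) : String := (PySem.List.pyGet? ws k).getD ""

def pvBuckets (ws : List String) (L : Int) : PySem.Dict (Int × String × String) (List Int) :=
  (PySem.List.pyRange 0 (ws.length : Int)).foldl (fun b j =>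
    (PySem.List.pyRange 0 L).foldl (fun b i =>
      b.modify (pvMaskKey (pvWAt ws j) i) [] (· ++ [j])) b) PySem.Dict.empty

def pvNbr (ws : List String) (L : Int) (w : String) : List Int :=
  (PySem.List.pyRange 0 L).foldl (fun acc i =>
    ((pvBuckets ws L).getD (pvMaskKey w i) []).foldl (fun acc k =>
      if PySem.Str.pyGet? (pvWAt ws k) i ≠ PySem.Str.pyGet? w i
      then acc ++ [k] else acc) acc) []

lemma pv_alt_eq (vocab : List String) (L : Int) :
    build_orthographic_neighborhood_graph_alt vocab L =
    (let ws := vocab.filter (fun w => PySem.Str.len w == L)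
     ((PySem.List.pyRange 0 (ws.length : Int)).foldl (fun g j =>
        g.insert (pvWAt ws j) ((PySem.List.sorted (pvNbr ws L (pvWAt ws j)) (fun x => x)).map
          (fun k => pvWAt ws k))) PySem.Dict.empty).items) := rfl

lemma pvWAt_natCast (ws : List String) (j : Nat) : pvWAt ws (j : Int) = ws.getD j "" := by
  simp [pvWAt, PySem.List.pyGet?_natCast, List.getD_eq_getElem?_getD]

lemma pv_map_getD_range {α : Type} (l : List α) (d : α) :
    (List.range l.length).map (fun i => l.getD i d) = l := by
  induction l with
  | nil => simp
  | cons x t ih =>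
    simp [List.range_succ_eq_map, List.map_map, Function.comp_def]
    exact ih

lemma pv_filter_map_getD_range {α : Type} (l : List α) (q : α → Bool) (d : α) :
    ((List.range l.length).filter (fun k => q (l.getD k d))).map (fun k => l.getD k d)
      = l.filter q := by
  induction l with
  | nil => simp
  | cons x t ih =>
    have hPs : ((fun k => q ((x :: t).getD k d)) ∘ Nat.succ) = (fun k => q (t.getD k d)) := by
      funext k; simp
    have hGs : ((fun k => (x :: t).getD k d) ∘ Nat.succ) = (fun k => t.getD k d) := by
      funext k; simp
    rw [List.length_cons, List.range_succ_eq_map, List.filter_cons, List.filter_map, hPs]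
    by_cases h : q x
    · rw [List.getD_cons_zero, if_pos h, List.map_cons, List.map_map, hGs,
        List.getD_cons_zero, List.filter_cons, if_pos h, ih]
    · rw [List.getD_cons_zero, if_neg (by simp [h]), List.map_map, hGs,
        List.filter_cons, if_neg (by simp [h]), ih]

lemma pv_flatMap_ite {α : Type} (l : List α) (p : α → Bool) :
    (l.flatMap fun x => if p x then [x] else []) = l.filter p := by
  induction l with
  | nil => simp
  | cons x t ih => by_cases h : p x <;> simp [h, ih]

lemma pv_filter_unique {α : Type} (l : List α) (p : α → Bool) (a : α)
    (h1 : l.Nodup) (h2 : a ∈ l) (h3 : ∀ x ∈ l, p x = true → x = a) :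
    l.filter p = if p a then [a] else [] := by
  induction l with
  | nil => cases h2
  | cons x t ih =>
    rcases List.mem_cons.mp h2 with rfl | hat
    · have ht : t.filter p = [] := by
        rw [List.filter_eq_nil_iff]
        intro y hy hpy
        exact (List.nodup_cons.mp h1).1 ((h3 y (List.mem_cons_of_mem _ hy) hpy) ▸ hy)
      by_cases h : p a <;> simp [h, ht]
    · have hx : p x = false := by
        by_contra hc
        have := h3 x (List.mem_cons_self) (by simpa using hc)
        exact (List.nodup_cons.mp h1).1 (this ▸ hat)
      rw [List.filter_cons, if_neg (by simp [hx])]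
      exact ih (List.nodup_cons.mp h1).2 hat
        (fun y hy hpy => h3 y (List.mem_cons_of_mem _ hy) hpy)

lemma pv_count_flatMap {α β : Type} [BEq β] (l : List α) (f : α → List β) (x : β) :
    (l.flatMap f).count x = (l.map (fun i => (f i).count x)).sum := by
  induction l with
  | nil => simp
  | cons y t ih => simp [List.count_append, ih]

lemma pv_count_filter_ite {α : Type} [BEq α] [LawfulBEq α] (l : List α) (p : α → Bool) (x : α) :
    (l.filter p).count x = if p x then l.count x else 0 := by
  by_cases h : p x
  · simp [List.count_filter h, h]
  · rw [if_neg h, List.count_eq_zero]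
    intro hmem
    exact h (List.of_mem_filter hmem)

lemma pv_unique_countP (m : Nat) (p : Nat → Bool) :
    (List.range m).countP
      (fun i => p i && decide (∀ t, t < m → p t = true → t = i))
      = if (List.range m).countP p = 1 then 1 else 0 := by
  by_cases h : (List.range m).countP p = 1
  · obtain ⟨i0, hfi⟩ := List.length_eq_one_iff.mp
      (by rw [← List.countP_eq_length_filter]; exact h)
    have hi0 : i0 ∈ List.range m ∧ p i0 = true := by
      have : i0 ∈ (List.range m).filter p := by rw [hfi]; exact List.mem_singleton_self _
      exact ⟨List.mem_of_mem_filter this, List.of_mem_filter this⟩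
    have huniq : ∀ t, t < m → p t = true → t = i0 := by
      intro t htm hpt
      have : t ∈ (List.range m).filter p :=
        List.mem_filter.mpr ⟨List.mem_range.mpr htm, hpt⟩
      rw [hfi] at this; simpa using this
    rw [h, if_pos rfl]
    have hcongr : (List.range m).countP
        (fun i => p i && decide (∀ t, t < m → p t = true → t = i))
        = (List.range m).countP (fun i => i == i0) := by
      apply List.countP_congr
      intro x hx
      simp only [Bool.and_eq_true, decide_eq_true_eq, beq_iff_eq]
      constructor
      · rintro ⟨hpx, _⟩; exact huniq x (List.mem_range.mp hx) hpx
      · rintro rfl; exact ⟨hi0.2, huniq⟩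
    rw [hcongr]
    have hfil : (List.range m).filter (fun i => i == i0) = [i0] := by
      have := pv_filter_unique (List.range m) (fun i => i == i0) i0 List.nodup_range hi0.1
        (fun x _ hx => by simpa using hx)
      simpa using this
    rw [List.countP_eq_length_filter, hfil]; rfl
  · rw [if_neg h]
    rw [List.countP_eq_zero]
    intro x hx
    simp only [Bool.and_eq_true, decide_eq_true_eq, not_and]
    intro hpx huniq
    have : (List.range m).filter p = [x] := by
      have := pv_filter_unique (List.range m) p x (List.nodup_range) hx
        (fun y hy hpy => huniq y (List.mem_range.mp hy) hpy)
      rwa [if_pos hpx] at this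
    exact h (by rw [List.countP_eq_length_filter, this]; rfl)

lemma pv_countP_zip (u v : List Char) (h : v.length = u.length) :
    (u.zip v).countP (fun p => decide (p.1 ≠ p.2))
      = (List.range u.length).countP (fun t => decide (v[t]? ≠ u[t]?)) := by
  induction u generalizing v with
  | nil => simp
  | cons a u' ih =>
    match v, h with
    | b :: v', h =>
      have hs : ((fun t => decide ((b :: v')[t]? ≠ (a :: u')[t]?)) ∘ Nat.succ)
          = fun t => decide (v'[t]? ≠ u'[t]?) := by funext t; simp
      rw [List.zip_cons_cons, List.countP_cons, List.length_cons, List.range_succ_eq_map,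
        List.countP_cons, List.countP_map, hs, ih v' (by simpa using h)]
      simp [ne_comm]

lemma pv_take_drop_iff (u v : List Char) (i : Nat) :
    (v.take i = u.take i ∧ v.drop (i + 1) = u.drop (i + 1))
      ↔ ∀ t, t ≠ i → v[t]? = u[t]? := by
  constructor
  · rintro ⟨h1, h2⟩ t ht
    rcases Nat.lt_or_ge t i with hlt | hge
    · have := congrArg (fun l => l[t]?) h1
      simpa [List.getElem?_take, hlt] using this
    · have hgt : i + 1 ≤ t := by omega
      have := congrArg (fun l => l[t - (i+1)]?) h2
      simp only [List.getElem?_drop] at this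
      rwa [Nat.add_sub_cancel' hgt] at this
  · intro h
    constructor
    · apply List.ext_getElem?
      intro t
      simp only [List.getElem?_take]
      split_ifs with hlt
      · exact h t (by omega)
      · rfl
    · apply List.ext_getElem?
      intro t
      simp only [List.getElem?_drop]
      exact h (i + 1 + t) (by omega)

lemma pv_core (u v : List Char) (h : v.length = u.length) :
    (List.range u.length).countP (fun i =>
        (decide (v.take i = u.take i) && decide (v.drop (i+1) = u.drop (i+1)))
          && decide (v[i]? ≠ u[i]?))
      = if (u.zip v).countP (fun p => decide (p.1 ≠ p.2)) = 1 then 1 else 0 := by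
  rw [pv_countP_zip u v h]
  rw [← pv_unique_countP u.length (fun t => decide (v[t]? ≠ u[t]?))]
  apply List.countP_congr
  intro i hi
  simp only [Bool.and_eq_true, decide_eq_true_eq]
  constructor
  · rintro ⟨⟨ht, hd⟩, hne⟩
    refine ⟨hne, ?_⟩
    intro t _ hbad
    by_contra hti
    exact hbad ((pv_take_drop_iff u v i).mp ⟨ht, hd⟩ t hti)
  · rintro ⟨hne, huniq⟩
    refine ⟨(pv_take_drop_iff u v i).mpr ?_, hne⟩
    intro t hti
    by_cases htm : t < u.length
    · by_contra hc
      exact hti (huniq t htm (by simpa using hc))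
    · rw [List.getElem?_eq_none (by omega), List.getElem?_eq_none (by omega)]

-- first components of equal mask keys agree
lemma pv_maskKey_fst {w w' : String} {i i' : Int}
    (h : (pvMaskKey w' i' == pvMaskKey w i) = true) : i' = i := by
  simp only [pvMaskKey, beq_iff_eq, Prod.mk.injEq] at h
  exact h.1

lemma pv_buckets_getD (ws : List String) (L : Int) (w : String) (i : Int)
    (hi : 0 ≤ i ∧ i < L) :
    (pvBuckets ws L).getD (pvMaskKey w i) [] =
      (PySem.List.pyRange 0 (ws.length : Int)).filter
        (fun k => pvMaskKey (pvWAt ws k) i == pvMaskKey w i) := by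
  unfold pvBuckets
  have hstep : ∀ (b : PySem.Dict (Int × String × String) (List Int)) (j : Int),
      (PySem.List.pyRange 0 L).foldl (fun b i =>
        b.modify (pvMaskKey (pvWAt ws j) i) [] (· ++ [j])) b
      = ((PySem.List.pyRange 0 L).map (fun i' => (pvMaskKey (pvWAt ws j) i', j))).foldl
          (fun b p => b.modify p.1 [] (· ++ [p.2])) b := by
    intro b j
    rw [List.foldl_map]
  rw [PySem.List.foldl_congr_mem _ _
    (fun b j => ((PySem.List.pyRange 0 L).map (fun i' => (pvMaskKey (pvWAt ws j) i', j))).foldl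
      (fun b p => b.modify p.1 [] (· ++ [p.2])) b) _
    (fun acc j _ => hstep acc j)]
  rw [← List.foldl_flatMap, PySem.Dict.getD_foldl_modify_append, PySem.Dict.getD_empty,
    List.nil_append, List.filter_flatMap, List.map_flatMap]
  have hper : ∀ j : Int,
      (((PySem.List.pyRange 0 L).map (fun i' => (pvMaskKey (pvWAt ws j) i', j))).filter
          (fun p => p.1 == pvMaskKey w i)).map (fun p => p.2)
        = if pvMaskKey (pvWAt ws j) i == pvMaskKey w i then [j] else [] := by
    intro j
    rw [List.filter_map, List.map_map]
    have hfil : (PySem.List.pyRange 0 L).filter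
        ((fun p => p.1 == pvMaskKey w i) ∘ (fun i' => (pvMaskKey (pvWAt ws j) i', j)))
        = if pvMaskKey (pvWAt ws j) i == pvMaskKey w i then [i] else [] := by
      exact pv_filter_unique _ _ i (PySem.List.nodup_pyRange_one 0 L)
        (PySem.List.mem_pyRange_one.mpr hi)
        (fun x _ hx => pv_maskKey_fst hx)
    rw [hfil, apply_ite (List.map ((fun p => p.2) ∘ (fun i' => (pvMaskKey (pvWAt ws j) i', j))))]
    simp
  calc ((PySem.List.pyRange 0 (ws.length : Int)).flatMap fun j =>
          (((PySem.List.pyRange 0 L).map (fun i' => (pvMaskKey (pvWAt ws j) i', j))).filter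
            (fun p => p.1 == pvMaskKey w i)).map (fun p => p.2))
      = (PySem.List.pyRange 0 (ws.length : Int)).flatMap (fun j =>
          if pvMaskKey (pvWAt ws j) i == pvMaskKey w i then [j] else []) := by
        exact congrArg (fun f => List.flatMap f (PySem.List.pyRange 0 (ws.length : Int))) (funext hper)
    _ = _ := pv_flatMap_ite _ _

lemma pv_nbr_eq (ws : List String) (L : Int) (w : String) :
    pvNbr ws L w = (PySem.List.pyRange 0 L).flatMap (fun i =>
      (PySem.List.pyRange 0 (ws.length : Int)).filter (fun k =>
        decide (PySem.Str.pyGet? (pvWAt ws k) i ≠ PySem.Str.pyGet? w i)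
          && (pvMaskKey (pvWAt ws k) i == pvMaskKey w i))) := by
  unfold pvNbr
  rw [PySem.List.foldl_congr_mem _ _
    (fun acc i => acc ++ (PySem.List.pyRange 0 (ws.length : Int)).filter (fun k =>
        decide (PySem.Str.pyGet? (pvWAt ws k) i ≠ PySem.Str.pyGet? w i)
          && (pvMaskKey (pvWAt ws k) i == pvMaskKey w i))) _ ?_]
  · rw [PySem.List.foldl_append_eq_flatMap, List.nil_append]
  · intro acc i hi
    rw [PySem.List.foldl_append_ite_eq_filter, pv_buckets_getD ws L w i
      (PySem.List.mem_pyRange_one.mp hi), List.filter_filter]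

lemma pv_mask_beq (w c : String) (i : Nat) :
    ((pvMaskKey c (i : Int) == pvMaskKey w (i : Int)) = true)
      ↔ (c.toList.take i = w.toList.take i ∧ c.toList.drop (i+1) = w.toList.drop (i+1)) := by
  rw [beq_iff_eq]
  unfold pvMaskKey
  rw [Prod.mk.injEq, Prod.mk.injEq,
    ← String.toList_inj, ← String.toList_inj,
    PySem.Str.toList_slice, PySem.Str.toList_slice,
    PySem.Str.toList_slice, PySem.Str.toList_slice,
    PySem.Chars.slice_eq_listSlice, PySem.Chars.slice_eq_listSlice,
    PySem.Chars.slice_eq_listSlice, PySem.Chars.slice_eq_listSlice,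
    PySem.List.slice_to _ (Int.natCast_nonneg i), PySem.List.slice_to _ (Int.natCast_nonneg i),
    PySem.List.slice_from _ (by omega : (0:Int) ≤ (i : Int) + 1),
    PySem.List.slice_from _ (by omega : (0:Int) ≤ (i : Int) + 1)]
  have h1 : ((i : Int)).toNat = i := Int.toNat_natCast i
  have h2 : ((i : Int) + 1).toNat = i + 1 := by omega
  rw [h1, h2]
  simp

lemma pv_check_eq (w c : String) (hlen : PySem.Str.len c = PySem.Str.len w) :
    (check_metagram w c == some true)
      = decide ((w.toList.zip c.toList).countP (fun p => decide (p.1 ≠ p.2)) = 1) := by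
  unfold check_metagram
  rw [if_neg (by rw [hlen]; exact fun h => h rfl)]
  have hsum : (List.map (fun p => if p.1 ≠ p.2 then (1 : Int) else 0) (w.toList.zip c.toList)).sum
      = ((w.toList.zip c.toList).countP (fun p => decide (p.1 ≠ p.2)) : Int) := by
    rw [← PySem.List.sum_map_ite_one_zero]
    simp
  rw [hsum]
  apply Bool.eq_iff_iff.mpr
  simp only [beq_iff_eq, Option.some.injEq, decide_eq_true_eq]
  constructor
  · intro h; exact_mod_cast h
  · intro h; exact_mod_cast h

lemma pv_perj (ws : List String) (L : Int)
    (H : ∀ w ∈ ws, PySem.Str.len w = L) (j : Nat) (hj : j < ws.length) :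
    (PySem.List.sorted (pvNbr ws L (pvWAt ws (j : Int))) (fun x => x)).map
        (fun k => pvWAt ws k)
      = find_orthographic_neighborhood (pvWAt ws (j : Int)) ws := by
  set w := pvWAt ws (j : Int) with hwdef
  have hwmem : w ∈ ws := by
    rw [hwdef, pvWAt_natCast, List.getD_eq_getElem ws "" hj]
    exact List.getElem_mem hj
  set m := w.toList.length with hmdef
  have hmL : (m : Int) = L := by
    have := H w hwmem
    rwa [PySem.Str.len_eq] at this
  have hmemAt : ∀ k : Nat, k < ws.length → pvWAt ws (k : Int) ∈ ws := by
    intro k hk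
    rw [pvWAt_natCast, List.getD_eq_getElem ws "" hk]
    exact List.getElem_mem hk
  have hlenAt : ∀ k : Nat, k < ws.length → (pvWAt ws (k : Int)).toList.length = m := by
    intro k hk
    have := H _ (hmemAt k hk)
    rw [PySem.Str.len_eq, ← hmL] at this
    exact_mod_cast this
  set q : String → Bool := fun c => check_metagram w c == some true with hq
  set targetI : List Int :=
    ((List.range ws.length).filter (fun k => q (ws.getD k ""))).map (Nat.cast : Nat → Int) with htarget
  have hsorted : PySem.List.sorted (pvNbr ws L w) (fun x => x) = targetI := by
    apply PySem.List.sorted_eq_of_perm_of_pairwise_lt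
    · rw [List.perm_iff_count]
      intro x
      by_cases hx : 0 ≤ x ∧ x < (ws.length : Int)
      · obtain ⟨k, rfl, hk⟩ : ∃ k : Nat, x = (k : Int) ∧ k < ws.length := by
          refine ⟨x.toNat, ?_, ?_⟩ <;> omega
        -- target side
        have htc : targetI.count (k : Int) = if q (ws.getD k "") then 1 else 0 := by
          rw [htarget, List.count_map_of_injective _ _ (fun a b h => by omega) k,
            pv_count_filter_ite, List.count_eq_one_of_mem List.nodup_range (List.mem_range.mpr hk)]
        -- nbr side
        have hnc : (pvNbr ws L w).count (k : Int) = if q (ws.getD k "") then 1 else 0 := by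
          rw [pv_nbr_eq, pv_count_flatMap]
          have hone : ∀ i : Int,
              ((PySem.List.pyRange 0 (ws.length : Int)).filter (fun k' =>
                decide (PySem.Str.pyGet? (pvWAt ws k') i ≠ PySem.Str.pyGet? w i)
                  && (pvMaskKey (pvWAt ws k') i == pvMaskKey w i))).count (k : Int)
              = if (decide (PySem.Str.pyGet? (pvWAt ws (k : Int)) i ≠ PySem.Str.pyGet? w i)
                  && (pvMaskKey (pvWAt ws (k : Int)) i == pvMaskKey w i)) then 1 else 0 := by
            intro i
            rw [pv_count_filter_ite]
            congr 1
            rw [PySem.List.pyRange_zero_natCast,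
              List.count_map_of_injective _ _ (fun a b h => by omega) k,
              List.count_eq_one_of_mem List.nodup_range (List.mem_range.mpr hk)]
          rw [List.map_congr_left (fun i _ => hone i),
            PySem.List.sum_map_ite_one_zero_nat, ← hmL, PySem.List.pyRange_zero_natCast,
            List.countP_map]
          set u := w.toList
          set v := (pvWAt ws (k : Int)).toList with hvdef
          have hvu : v.length = u.length := by
            rw [hvdef, hlenAt k hk]
          have hcore := pv_core u v hvu
          rw [show u.length = m from rfl] at hcore
          rw [List.countP_congr (q := fun i =>
              (decide (v.take i = u.take i) && decide (v.drop (i+1) = u.drop (i+1)))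
                && decide (v[i]? ≠ u[i]?)) ?_, hcore]
          · -- turn the countP over the zip into q
            have hc : ws.getD k "" = pvWAt ws (k : Int) := (pvWAt_natCast ws k).symm
            have hlen2 : PySem.Str.len (ws.getD k "") = PySem.Str.len w := by
              rw [H _ hwmem, hc, H _ (hmemAt k hk)]
            have hqv : q (ws.getD k "")
                = decide ((u.zip v).countP (fun p => decide (p.1 ≠ p.2)) = 1) := by
              rw [hq]
              show (check_metagram w (ws.getD k "") == some true) = _
              rw [pv_check_eq w (ws.getD k "") hlen2, hc]
            rw [hqv]
            simp
          · intro i hi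
            have him : i < m := List.mem_range.mp hi
            simp only [Bool.and_eq_true, decide_eq_true_eq, Function.comp]
            rw [PySem.Str.pyGet?_natCast, PySem.Str.pyGet?_natCast]
            constructor
            · rintro ⟨hne, hmask⟩
              have := (pv_mask_beq w (pvWAt ws (k : Int)) i).mp hmask
              exact ⟨⟨this.1, this.2⟩, hne⟩
            · rintro ⟨⟨ht, hd⟩, hne⟩
              exact ⟨hne, (pv_mask_beq w (pvWAt ws (k : Int)) i).mpr ⟨ht, hd⟩⟩
        rw [htc, hnc]
      · -- out of range: both counts are 0
        have h1 : (pvNbr ws L w).count x = 0 := List.count_eq_zero.mpr (by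
          intro hmem
          rw [pv_nbr_eq] at hmem
          obtain ⟨i, _, hmem2⟩ := List.mem_flatMap.mp hmem
          have := PySem.List.mem_pyRange_one.mp (List.mem_of_mem_filter hmem2)
          exact hx (by omega))
        have h2 : targetI.count x = 0 := List.count_eq_zero.mpr (by
          intro hmem
          rw [htarget] at hmem
          obtain ⟨k, hkmem, hkx⟩ := List.mem_map.mp hmem
          have := List.mem_range.mp (List.mem_of_mem_filter hkmem)
          exact hx (by omega))
        rw [h1, h2]
    · rw [htarget]
      apply List.Pairwise.map (Nat.cast : Nat → Int) (fun a b h => by exact_mod_cast h)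
      exact List.Pairwise.filter _ List.pairwise_lt_range
  rw [hsorted, htarget, List.map_map]
  have hcomp : ((fun k : Int => pvWAt ws k) ∘ (Nat.cast : Nat → Int))
      = fun k : Nat => ws.getD k "" := funext (fun k => pvWAt_natCast ws k)
  rw [hcomp, pv_filter_map_getD_range]
  rfl

lemma pv_a_eq (vocab : List String) (L : Int) :
    build_orthographic_neighborhood_graph vocab L =
    (let ws := vocab.filter (fun w => PySem.Str.len w == L)
     (ws.foldl (fun (d : PySem.Dict String (List String)) w =>
        d.insert w (find_orthographic_neighborhood w ws)) PySem.Dict.empty).items) := rfl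

lemma pv_foldl_insert_index {ν : Type} (l : List String) (f : String → ν)
    (d : PySem.Dict String ν) :
    l.foldl (fun d w => d.insert w (f w)) d
      = (List.range l.length).foldl (fun d j => d.insert (l.getD j "") (f (l.getD j ""))) d := by
  conv_lhs => rw [← pv_map_getD_range l ""]
  rw [List.foldl_map]

-- ===== VERDICT (by name: the statement is the Claim_ definition above) =====
theorem build_orthographic_neighborhood_graph_spec : Claim_equal_build_orthographic_neighborhood_graph := by
  intro vocab word_length _
  unfold Spec_build_orthographic_neighborhood_graph
  rw [pv_a_eq, pv_alt_eq]
  set L := word_length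
  set ws := vocab.filter (fun w => PySem.Str.len w == L) with hws
  have H : ∀ w ∈ ws, PySem.Str.len w = L := by
    intro w hw
    have := (List.mem_filter.mp hw).2
    simpa using this
  show (ws.foldl (fun (d : PySem.Dict String (List String)) w =>
      d.insert w (find_orthographic_neighborhood w ws)) PySem.Dict.empty).items = _
  apply congrArg PySem.Dict.items
  rw [pv_foldl_insert_index ws (fun w => find_orthographic_neighborhood w ws),
    PySem.List.pyRange_zero_natCast, List.foldl_map]
  apply (PySem.List.foldl_congr_mem _ _ _ _ ?_).symm
  intro acc j hj
  rw [pv_perj ws L H j (List.mem_range.mp hj), pvWAt_natCast ws j]
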